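-- pv_equiv track=rewrite | github.com/jungbin97/pythonworkspace | 탐색/[programmers]피로도.py | solution
-- ===== SOURCE A (Python) =====
-- from itertools import permutations
--
-- def solution(k, dungeons):
--     answer = 0
--     l = len(dungeons)
--     for i in permutations(range(l)):
--         current_k = k
--         cnt = 0
--         for t in i:
--             require, consum = dungeons[t]
--             if current_k >= require:     # 최소피로도 보다 크거나 같으면
--                 cnt += 1                 # 던전 방문 카운트 +1
--                 current_k -= consum      # 방문한 던전 소모피로도 만큼 감소
--         answer = max(answer, cnt)
--
--     return answer
-- ===== SOURCE B (Python) =====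
-- def solution(k, dungeons):
--     # Pruned DFS over remaining dungeons instead of enumerating all permutations.
--     def best(fatigue, remaining):
--         top = 0
--         for i in range(len(remaining)):
--             req, cost = remaining[i]
--             if fatigue >= req:
--                 top = max(top, 1 + best(fatigue - cost, remaining[:i] + remaining[i + 1:]))
--         return top
--     return best(k, dungeons)
-- ===== Notes on version B (the rewrite author's own statement) =====
-- stated objective: alternative
-- what changed: Replaces exhaustive enumeration of all n! index permutations (each re-scanned with skip-and-count) by a recursive DFS that at each step tries only the still-affordable dungeons on the remaining list, so the permutation generator disappears and infeasible orderings are pruned.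
import Mathlib
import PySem

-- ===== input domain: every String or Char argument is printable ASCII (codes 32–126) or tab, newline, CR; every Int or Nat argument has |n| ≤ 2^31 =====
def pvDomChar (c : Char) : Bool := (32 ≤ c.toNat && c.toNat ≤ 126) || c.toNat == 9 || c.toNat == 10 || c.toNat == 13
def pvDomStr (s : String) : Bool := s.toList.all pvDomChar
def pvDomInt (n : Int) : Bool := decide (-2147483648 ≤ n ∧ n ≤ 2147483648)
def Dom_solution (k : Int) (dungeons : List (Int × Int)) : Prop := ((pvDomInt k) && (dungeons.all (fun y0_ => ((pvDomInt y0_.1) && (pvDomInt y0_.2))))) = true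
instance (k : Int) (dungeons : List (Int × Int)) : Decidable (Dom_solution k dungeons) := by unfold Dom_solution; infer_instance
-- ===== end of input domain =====

-- B replaces A's enumeration of all n! index permutations by a pruned DFS over the
-- remaining-dungeon list (objective: alternative algorithm; same worst-case cost).

-- ===== PORT A =====
-- inner loop body of A: 'require, consum = dungeons[t]; if current_k >= require: cnt += 1; current_k -= consum'
def stepA (dungeons : List (Int × Int)) (st : Int × Int) (t : Int) : Int × Int :=
  match PySem.List.pyGet? dungeons t with
  | some rc => if st.1 ≥ rc.1 then (st.1 - rc.2, st.2 + 1) else st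
  | none => st

def solution (k : Int) (dungeons : List (Int × Int)) : Int :=
  let l := dungeons.length
  (PySem.List.permutations (PySem.List.pyRange 0 (l : Int) 1)
      (PySem.List.pyRange 0 (l : Int) 1).length).foldl
    (fun answer i => max answer (i.foldl (stepA dungeons) (k, 0)).2) 0

-- ===== PORT B =====
-- 'for i in range(len(remaining)): ...' — pre is remaining[:i], post is remaining[i:],
-- remaining[:i] + remaining[i+1:] is pre ++ rest; top is the running maximum.
def dfsGo (fatigue : Int) (pre post : List (Int × Int)) (top : Int) : Int :=
  match post with
  | [] => top
  | (req, cost) :: rest =>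
    if fatigue ≥ req then
      dfsGo fatigue (pre ++ [(req, cost)]) rest
        (max top (1 + dfsGo (fatigue - cost) [] (pre ++ rest) 0))
    else
      dfsGo fatigue (pre ++ [(req, cost)]) rest top
termination_by (pre.length + post.length, post.length)
decreasing_by
  all_goals simp [Prod.lex_def]
  all_goals omega

def solution_alt (k : Int) (dungeons : List (Int × Int)) : Int :=
  dfsGo k [] dungeons 0

-- ===== PRECONDITION & SPEC =====
def Spec_solution (k : Int) (dungeons : List (Int × Int)) (out : Int) : Prop := out = solution_alt k dungeons
instance (k : Int) (dungeons : List (Int × Int)) (out : Int) : Decidable (Spec_solution k dungeons out) := by unfold Spec_solution; infer_instance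

-- ===== CLAIM (what is proved, stated in full; the proofs are below) =====
def Claim_equal_solution : Prop := ∀ (k : Int) (dungeons : List (Int × Int)), Dom_solution k dungeons → Spec_solution k dungeons (solution k dungeons)

-- ===== LEMMAS AND PROOFS =====

-- definitional unfolding lemmas for dfsGo (well-founded recursion hides the equations from simp)
theorem dfsGo_nil (f : Int) (pre : List (Int × Int)) (top : Int) :
    dfsGo f pre [] top = top := by
  rw [dfsGo]

theorem dfsGo_cons (f : Int) (pre : List (Int × Int)) (r c : Int)
    (rest : List (Int × Int)) (top : Int) :
    dfsGo f pre ((r, c) :: rest) top =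
      if f ≥ r then
        dfsGo f (pre ++ [(r, c)]) rest
          (max top (1 + dfsGo (f - c) [] (pre ++ rest) 0))
      else
        dfsGo f (pre ++ [(r, c)]) rest top := by
  rw [dfsGo]


-- the count A's inner loop produces on a fixed visiting order (skip an unaffordable dungeon, keep going)
def greedy (f : Int) : List (Int × Int) → Int
  | [] => 0
  | rc :: rest => if f ≥ rc.1 then 1 + greedy (f - rc.2) rest else greedy f rest

theorem greedy_nonneg (f : Int) (p : List (Int × Int)) : 0 ≤ greedy f p := by
  induction p generalizing f with
  | nil => simp [greedy]
  | cons rc rest ih =>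
    simp only [greedy]
    split
    · have := ih (f - rc.2); omega
    · exact ih f

-- A's inner fold over an index list = greedy over the looked-up dungeon list
theorem foldl_stepA_eq (dungeons : List (Int × Int)) :
    ∀ (i : List Int) (f c0 : Int),
      (∀ t ∈ i, 0 ≤ t ∧ t < (dungeons.length : Int)) →
      (i.foldl (stepA dungeons) (f, c0)).2
        = c0 + greedy f (i.map (fun t => PySem.List.pyGetD dungeons t (0, 0))) := by
  intro i
  induction i with
  | nil => intro f c0 _; simp [greedy]
  | cons t rest ih =>
    intro f c0 h
    have ht := h t (by simp)
    have hget : PySem.List.pyGet? dungeons t = some dungeons[t.toNat] :=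
      PySem.List.pyGet?_eq_some_getElem dungeons ht.1 ht.2
    have hgetD : PySem.List.pyGetD dungeons t (0, 0) = dungeons[t.toNat] :=
      PySem.List.pyGetD_eq_getElem dungeons (0, 0) ht.1 ht.2
    have hrest : ∀ s ∈ rest, 0 ≤ s ∧ s < (dungeons.length : Int) :=
      fun s hs => h s (by simp [hs])
    simp only [List.foldl_cons, List.map_cons, greedy, stepA, hget, hgetD]
    split
    · rw [ih _ _ hrest]; omega
    · rw [ih _ _ hrest]

theorem le_dfsGo :
    ∀ (post pre : List (Int × Int)) (f b : Int), b ≤ dfsGo f pre post b := by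
  intro post
  induction post with
  | nil => intro pre f b; simp [dfsGo_nil]
  | cons d rest ih =>
    intro pre f b
    rcases d with ⟨r, c⟩
    by_cases hf : f ≥ r
    · simp only [dfsGo_cons, if_pos hf]
      exact le_trans (le_max_left _ _) (ih _ _ _)
    · simp only [dfsGo_cons, if_neg hf]
      exact ih _ _ _

-- picking the dungeon sitting between post1 and post2 is one of the options dfsGo tries
theorem dfsGo_pick :
    ∀ (post1 pre post2 : List (Int × Int)) (r c f b : Int), f ≥ r →
      max b (1 + dfsGo (f - c) [] (pre ++ (post1 ++ post2)) 0)
        ≤ dfsGo f pre (post1 ++ (r, c) :: post2) b := by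
  intro post1
  induction post1 with
  | nil =>
    intro pre post2 r c f b hf
    simp only [List.nil_append]
    simp only [dfsGo_cons, if_pos hf]
    exact le_dfsGo _ _ _ _
  | cons d t ih =>
    intro pre post2 r c f b hf
    rcases d with ⟨r', c'⟩
    simp only [List.cons_append]
    rw [dfsGo_cons]
    have hl : pre ++ ((r', c') :: (t ++ post2)) = (pre ++ [(r', c')]) ++ (t ++ post2) := by
      simp
    split
    · rename_i hf'
      refine le_trans (max_le_max (le_max_left b (1 + dfsGo (f - c') [] (pre ++ (t ++ (r, c) :: post2)) 0)) le_rfl) ?_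
      rw [hl]
      exact ih (pre ++ [(r', c')]) post2 r c f _ hf
    · rw [hl]
      exact ih (pre ++ [(r', c')]) post2 r c f b hf

-- upper bound: the greedy count of any sub-permutation of ds is at most dfsGo's answer
theorem greedy_le_dfsGo :
    ∀ (p s ds : List (Int × Int)) (f : Int), s.Sublist ds → p.Perm s →
      greedy f p ≤ dfsGo f [] ds 0 := by
  intro p
  induction p with
  | nil =>
    intro s ds f _ _
    simpa [greedy] using le_dfsGo ds [] f 0
  | cons rc rest ih =>
    intro s ds f hs hp
    rcases rc with ⟨r, c⟩
    have hmem : (r, c) ∈ s := hp.mem_iff.mp (List.mem_cons_self)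
    have hmemds : (r, c) ∈ ds := hs.subset hmem
    obtain ⟨l1, l2, -, hds, herase⟩ := List.exists_erase_eq hmemds
    have hrest : rest.Perm (s.erase (r, c)) := by
      have h1 := hp.erase (r, c)
      simpa using h1
    have hsub : (s.erase (r, c)).Sublist (ds.erase (r, c)) := hs.erase (r, c)
    simp only [greedy]
    split
    · rename_i hf
      have hIH : greedy (f - c) rest ≤ dfsGo (f - c) [] (l1 ++ l2) 0 := by
        have := ih _ _ (f - c) (herase ▸ hsub) hrest
        exact this
      have hpick := dfsGo_pick l1 [] l2 r c f 0 hf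
      simp only [List.nil_append] at hpick
      rw [← hds] at hpick
      omega
    · exact ih _ _ f (hsub.trans (List.erase_sublist)) hrest

-- lower bound: dfsGo's answer is realised by the greedy count of some permutation
theorem dfsGo_le_greedy :
    ∀ (n : Nat) (post pre : List (Int × Int)) (f b : Int),
      pre.length + post.length = n →
      ∃ p, p.Perm (pre ++ post) ∧ dfsGo f pre post b ≤ max b (greedy f p) := by
  intro n
  induction n using Nat.strong_induction_on with
  | _ n IHn =>
    intro post
    induction post with
    | nil =>
      intro pre f b _
      exact ⟨pre, by simp, by rw [dfsGo_nil]; exact le_max_left _ _⟩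
    | cons d rest IHpost =>
      rcases d with ⟨r, c⟩
      intro pre f b hlen
      have hlen' : (pre ++ [(r, c)]).length + rest.length = n := by
        simp at hlen ⊢; omega
      by_cases hf : f ≥ r
      · simp only [dfsGo_cons, if_pos hf]
        obtain ⟨p, hp, hle⟩ :=
          IHpost (pre ++ [(r, c)]) f (max b (1 + dfsGo (f - c) [] (pre ++ rest) 0)) hlen'
        rw [List.append_assoc, List.singleton_append] at hp
        have hn1 : 1 ≤ n := by simp at hlen; omega
        obtain ⟨p', hp', hle'⟩ :=
          IHn (n - 1) (by omega) (pre ++ rest) [] (f - c) 0 (by simp at hlen ⊢; omega)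
        simp only [List.nil_append] at hp'
        have hR : dfsGo (f - c) [] (pre ++ rest) 0 ≤ greedy (f - c) p' := by
          have := greedy_nonneg (f - c) p'
          omega
        have hq : ((r, c) :: p').Perm (pre ++ (r, c) :: rest) :=
          (hp'.cons (r, c)).trans List.perm_middle.symm
        have hgq : greedy f ((r, c) :: p') = 1 + greedy (f - c) p' := by
          simp [greedy, if_pos hf]
        by_cases hcmp : 1 + dfsGo (f - c) [] (pre ++ rest) 0 ≤ greedy f p
        · exact ⟨p, hp, by omega⟩
        · exact ⟨(r, c) :: p', hq, by omega⟩
      · simp only [dfsGo_cons, if_neg hf]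
        obtain ⟨p, hp, hle⟩ := IHpost (pre ++ [(r, c)]) f b hlen'
        rw [List.append_assoc, List.singleton_append] at hp
        exact ⟨p, hp, hle⟩

theorem eraseIdx_append_middle {α : Type} :
    ∀ (l1 : List α) (x : α) (l2 : List α),
      (l1 ++ x :: l2).eraseIdx l1.length = l1 ++ l2 := by
  intro l1
  induction l1 with
  | nil => intro x l2; simp
  | cons a t ih => intro x l2; simpa using ih x l2

-- every permutation of xs is produced by PySem.List.permutations xs xs.length
theorem mem_permutations_of_perm {α : Type} [DecidableEq α] :
    ∀ (p xs : List α), p.Perm xs → p ∈ PySem.List.permutations xs xs.length := by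
  intro p
  induction p with
  | nil =>
    intro xs h
    have : xs = [] := h.symm.eq_nil
    subst this
    simp [PySem.List.permutations_zero]
  | cons x p ih =>
    intro xs h
    have hx : x ∈ xs := h.mem_iff.mp (List.mem_cons_self)
    obtain ⟨l1, l2, -, hds, -⟩ := List.exists_erase_eq hx
    subst hds
    have hlen : (l1 ++ x :: l2).length = p.length + 1 := by
      rw [← h.length_eq]; simp
    rw [hlen, PySem.List.permutations_succ]
    apply List.mem_flatMap.mpr
    refine ⟨l1.length, List.mem_range.mpr (by simp), ?_⟩
    have hget : (l1 ++ x :: l2)[l1.length]? = some x := by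
      rw [List.getElem?_append_right (Nat.le_refl _)]
      simp
    rw [hget]
    apply List.mem_map.mpr
    refine ⟨p, ?_, rfl⟩
    rw [eraseIdx_append_middle]
    have hperm : p.Perm (l1 ++ l2) :=
      (h.trans List.perm_middle).cons_inv
    have hlen2 : (l1 ++ l2).length = p.length := by
      rw [hperm.length_eq]
    rw [← hlen2] at *
    exact ih _ hperm

-- a permutation of a mapped list comes from a permutation of the original list
theorem perm_map_exists {α β : Type} (f : α → β) :
    ∀ {m p : List β}, m.Perm p → ∀ l : List α, m = l.map f →
      ∃ i : List α, i.Perm l ∧ i.map f = p := by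
  intro m p h
  induction h with
  | nil =>
    intro l hl
    exact ⟨l, List.Perm.refl l, hl.symm⟩
  | cons x h ih =>
    intro l hl
    rcases l with _ | ⟨a, l'⟩
    · simp at hl
    · simp only [List.map_cons, List.cons.injEq] at hl
      obtain ⟨i', hi', hmap⟩ := ih l' hl.2
      exact ⟨a :: i', hi'.cons a, by simp [hmap, hl.1]⟩
  | swap x y t =>
    intro l hl
    rcases l with _ | ⟨a, _ | ⟨b, l'⟩⟩ <;> simp at hl
    obtain ⟨hy, hx, ht⟩ := hl
    exact ⟨b :: a :: l', List.Perm.swap a b l', by simp [hx, hy, ht]⟩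
  | trans h1 h2 ih1 ih2 =>
    intro l hl
    obtain ⟨i1, hi1, hm1⟩ := ih1 l hl
    obtain ⟨i2, hi2, hm2⟩ := ih2 i1 hm1.symm
    exact ⟨i2, hi2.trans hi1, hm2⟩

theorem foldl_max_le {β : Type} (F : β → Int) :
    ∀ (L : List β) (init M : Int), init ≤ M → (∀ x ∈ L, F x ≤ M) →
      L.foldl (fun a x => max a (F x)) init ≤ M := by
  intro L
  induction L with
  | nil => intro init M h _; simpa using h
  | cons x t ih =>
    intro init M h hall
    simp only [List.foldl_cons]
    exact ih _ _ (max_le h (hall x (by simp))) (fun y hy => hall y (by simp [hy]))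

theorem init_le_foldl_max {β : Type} (F : β → Int) :
    ∀ (L : List β) (i : Int), i ≤ L.foldl (fun a x => max a (F x)) i := by
  intro L
  induction L with
  | nil => intro i; simp
  | cons x t ih =>
    intro i
    simp only [List.foldl_cons]
    exact le_trans (le_max_left _ _) (ih _)

theorem le_foldl_max {β : Type} (F : β → Int) :
    ∀ (L : List β) (init : Int) (a : β), a ∈ L →
      F a ≤ L.foldl (fun a x => max a (F x)) init := by
  intro L
  induction L with
  | nil => intro init a h; simp at h
  | cons x t ih =>
    intro init a h
    simp only [List.foldl_cons]
    rcases List.mem_cons.mp h with h | h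
    · subst h
      exact le_trans (le_max_right _ _) (init_le_foldl_max F t _)
    · exact ih _ a h

-- ===== VERDICT (by name: the statement is the Claim_ definition above) =====
theorem solution_spec : Claim_equal_solution := by
  unfold Claim_equal_solution
  intro k dungeons _
  unfold Spec_solution solution solution_alt
  dsimp only
  have hmapg : (PySem.List.pyRange 0 (dungeons.length : Int) 1).map
      (fun t => PySem.List.pyGetD dungeons t (0, 0)) = dungeons :=
    PySem.List.map_pyGetD_pyRange_zero' dungeons ((0, 0) : Int × Int)
  have hvalid : ∀ (i : List Int), i.Perm (PySem.List.pyRange 0 (dungeons.length : Int) 1) →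
      ∀ t ∈ i, 0 ≤ t ∧ t < (dungeons.length : Int) := by
    intro i hi t ht
    have := PySem.List.mem_pyRange_one.mp (hi.mem_iff.mp ht)
    omega
  apply le_antisymm
  · -- A ≤ B: every permutation's greedy count is bounded by dfsGo
    apply foldl_max_le (fun i : List Int => (List.foldl (stepA dungeons) (k, 0) i).2)
    · simpa using le_dfsGo dungeons [] k 0
    · intro i hi
      have hperm : i.Perm (PySem.List.pyRange 0 (dungeons.length : Int) 1) :=
        PySem.List.perm_of_mem_permutations hi
      rw [foldl_stepA_eq dungeons i k 0 (hvalid i hperm)]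
      have hpd := hperm.map (fun t => PySem.List.pyGetD dungeons t (0, 0))
      rw [hmapg] at hpd
      have := greedy_le_dfsGo (i.map (fun t => PySem.List.pyGetD dungeons t (0, 0)))
        dungeons dungeons k (List.Sublist.refl _) hpd
      omega
  · -- B ≤ A: dfsGo's answer is the greedy count of some permutation in A's list
    obtain ⟨p, hp, hle⟩ := dfsGo_le_greedy dungeons.length dungeons [] k 0 (by simp)
    simp only [List.nil_append] at hp
    have hge : dfsGo k [] dungeons 0 ≤ greedy k p := by
      have := greedy_nonneg k p
      omega
    rw [← hmapg] at hp
    obtain ⟨i, hi, hmi⟩ := perm_map_exists (fun t => PySem.List.pyGetD dungeons t (0, 0))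
      hp.symm (PySem.List.pyRange 0 (dungeons.length : Int) 1) rfl
    have hmem := mem_permutations_of_perm i (PySem.List.pyRange 0 (dungeons.length : Int) 1) hi
    have hF := le_foldl_max (fun i : List Int => (List.foldl (stepA dungeons) (k, 0) i).2)
      (PySem.List.permutations (PySem.List.pyRange 0 (dungeons.length : Int) 1)
        (PySem.List.pyRange 0 (dungeons.length : Int) 1).length) 0 i hmem
    have hFi : (i.foldl (stepA dungeons) (k, 0)).2 = greedy k p := by
      rw [foldl_stepA_eq dungeons i k 0 (hvalid i hi), hmi]
      omega
    dsimp only at hF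
    rw [hFi] at hF
    omega
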